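-- pv_equiv track=rewrite | github.com/PhilMarsh/adventofcode | 2024/22b.py | _yield_patterns_and_prices
-- ===== SOURCE A (Python) =====
-- _PRUNE_DIVISOR = 16777216
--
-- def _yield_patterns_and_prices(initial_secret, num_iterations):
--     secrets_iterators = (
--         _iter_skip(_yield_secrets(initial_secret, num_iterations), skip)
--         for skip in range(5)
--     )
--     for secrets_window in zip(*secrets_iterators):
--         prices = [_price(secret) for secret in secrets_window]
--         pattern = tuple(p2 - p1 for p1, p2 in zip(prices, prices[1:]))
--         last_price = prices[-1]
--         yield pattern, last_price
--
-- def _yield_secrets(secret, num_iterations):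
--     for _ in range(num_iterations):
--         yield secret
--         secret = _next_secret(secret)
--
-- def _next_secret(initial_secret):
--     step1 = _prune(_mix(initial_secret, initial_secret * 64))
--     step2 = _prune(_mix(step1, step1 // 32))
--     step3 = _prune(_mix(step2, step2 * 2048))
--     return step3
--
-- def _mix(secret, val):
--     return secret ^ val
--
-- def _prune(secret):
--     return secret % _PRUNE_DIVISOR
--
-- def _price(secret):
--     return secret % 10
--
-- def _iter_skip(iterator, num):
--     for _ in zip(range(num), iterator):
--         pass
--     return iterator
-- ===== SOURCE B (Python) =====
-- _PRUNE_DIVISOR = 16777216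
--
-- def _next_secret(secret):
--     secret = (secret ^ (secret * 64)) % _PRUNE_DIVISOR
--     secret = (secret ^ (secret // 32)) % _PRUNE_DIVISOR
--     secret = (secret ^ (secret * 2048)) % _PRUNE_DIVISOR
--     return secret
--
-- def _yield_patterns_and_prices(initial_secret, num_iterations):
--     # one pass: generate the secrets once, keep a sliding window of the last 5 prices
--     secret = initial_secret
--     window = []
--     for _ in range(num_iterations):
--         window.append(secret % 10)
--         if len(window) > 5:
--             window.pop(0)
--         if len(window) == 5:
--             a, b, c, d, e = window
--             yield (b - a, c - b, d - c, e - d), e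
--         secret = _next_secret(secret)
-- ===== Notes on version B (the rewrite author's own statement) =====
-- stated objective: faster
-- what changed: A zips five separately-skipped regenerations of the secret iterator to form 5-windows; B generates the secret sequence once in a single pass, maintaining a 5-element sliding window of prices.
import Mathlib
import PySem

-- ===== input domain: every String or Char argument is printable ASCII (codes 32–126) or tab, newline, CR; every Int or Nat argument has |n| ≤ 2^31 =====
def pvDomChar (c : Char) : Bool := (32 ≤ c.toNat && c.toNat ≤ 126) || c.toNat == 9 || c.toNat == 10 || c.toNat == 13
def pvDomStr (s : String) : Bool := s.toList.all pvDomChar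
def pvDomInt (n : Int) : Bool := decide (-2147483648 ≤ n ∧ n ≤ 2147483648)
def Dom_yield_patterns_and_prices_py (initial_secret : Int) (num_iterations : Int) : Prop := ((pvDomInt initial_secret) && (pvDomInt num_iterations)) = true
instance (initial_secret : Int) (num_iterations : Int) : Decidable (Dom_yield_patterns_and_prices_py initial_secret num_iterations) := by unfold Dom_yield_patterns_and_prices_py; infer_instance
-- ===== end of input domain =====

-- B replaces A's five skipped re-generations of the secret stream (zip of five iterators)
-- by a single pass over the secrets with a 5-element sliding price window (objective: faster, constant factor).


-- ===== PORT A =====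
-- _next_secret / _mix / _prune, inlined step by step
def pvNextSecret (s : Int) : Int :=
  let step1 := PySem.Int.mod (PySem.Int.bxor s (s * 64)) 16777216
  let step2 := PySem.Int.mod (PySem.Int.bxor step1 (PySem.Int.floordiv step1 32)) 16777216
  let step3 := PySem.Int.mod (PySem.Int.bxor step2 (step2 * 2048)) 16777216
  step3

-- _yield_secrets: the list of the first n secrets (range(n) is empty for n ≤ 0, handled by toNat at the call site)
def pvYieldSecrets (secret : Int) (n : Nat) : List Int :=
  match n with
  | 0 => []
  | n + 1 => secret :: pvYieldSecrets (pvNextSecret secret) n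

-- zip(*secrets_iterators): zip of the five skipped streams, stops at the shortest
def pvZip5 : List Int → List Int → List Int → List Int → List Int → List (Int × Int × Int × Int × Int)
  | a :: as, b :: bs, c :: cs, d :: ds, e :: es => (a, b, c, d, e) :: pvZip5 as bs cs ds es
  | _, _, _, _, _ => []

-- body of A's loop: prices comprehension over the 5-window, pattern = adjacent diffs, last_price = prices[-1]
def pvWindowEntry (w : Int × Int × Int × Int × Int) : List Int × Int :=
  let prices := [PySem.Int.mod w.1 10, PySem.Int.mod w.2.1 10, PySem.Int.mod w.2.2.1 10,
                 PySem.Int.mod w.2.2.2.1 10, PySem.Int.mod w.2.2.2.2 10]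
  let pattern := (prices.zip (prices.drop 1)).map (fun pr => pr.2 - pr.1)
  -- prices[-1]: prices is nonempty (5 literals), so pyGet? is some; getD is exact here
  let last_price := (PySem.List.pyGet? prices (-1)).getD 0
  (pattern, last_price)

def yield_patterns_and_prices_py (initial_secret : Int) (num_iterations : Int) : List (List Int × Int) :=
  -- _iter_skip(_yield_secrets(...), skip) for skip in range(5): the stream dropped by skip
  let secrets := pvYieldSecrets initial_secret num_iterations.toNat
  (pvZip5 secrets (secrets.drop 1) (secrets.drop 2) (secrets.drop 3) (secrets.drop 4)).map pvWindowEntry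

-- ===== PORT B =====
-- Source B's _next_secret (three in-place updates)
def pvNextSecretB (s : Int) : Int :=
  let s1 := PySem.Int.mod (PySem.Int.bxor s (s * 64)) 16777216
  let s2 := PySem.Int.mod (PySem.Int.bxor s1 (PySem.Int.floordiv s1 32)) 16777216
  let s3 := PySem.Int.mod (PySem.Int.bxor s2 (s2 * 2048)) 16777216
  s3

-- Source B's loop: n remaining iterations, current secret, sliding window of the last ≤5 prices
def pvAltLoop : Nat → Int → List Int → List (List Int × Int)
  | 0, _, _ => []
  | n + 1, s, win =>
    let w0 := win ++ [PySem.Int.mod s 10]          -- window.append(secret % 10)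
    let w := if 5 < w0.length then w0.tail else w0  -- if len(window) > 5: window.pop(0)
    let out := match w with                          -- if len(window) == 5: a,b,c,d,e = window; yield …
      | [a, b, c, d, e] => [([b - a, c - b, d - c, e - d], e)]
      | _ => []
    out ++ pvAltLoop n (pvNextSecretB s) w

def yield_patterns_and_prices_py_alt (initial_secret : Int) (num_iterations : Int) : List (List Int × Int) :=
  pvAltLoop num_iterations.toNat initial_secret []

-- ===== PRECONDITION & SPEC =====
def Spec_yield_patterns_and_prices_py (initial_secret : Int) (num_iterations : Int) (out : List (List Int × Int)) : Prop := out = yield_patterns_and_prices_py_alt initial_secret num_iterations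
instance (initial_secret : Int) (num_iterations : Int) (out : List (List Int × Int)) : Decidable (Spec_yield_patterns_and_prices_py initial_secret num_iterations out) := by unfold Spec_yield_patterns_and_prices_py; infer_instance

-- ===== CLAIM (what is proved, stated in full; the proofs are below) =====
def Claim_equal_yield_patterns_and_prices_py : Prop := ∀ (initial_secret : Int) (num_iterations : Int), Dom_yield_patterns_and_prices_py initial_secret num_iterations → Spec_yield_patterns_and_prices_py initial_secret num_iterations (yield_patterns_and_prices_py initial_secret num_iterations)

-- ===== LEMMAS AND PROOFS =====

-- reference form: the window entries of a plain price list
def pvGP : List Int → List (List Int × Int)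
  | p0 :: p1 :: p2 :: p3 :: p4 :: rest =>
      ([p1 - p0, p2 - p1, p3 - p2, p4 - p3], p4) :: pvGP (p1 :: p2 :: p3 :: p4 :: rest)
  | _ => []
termination_by xs => xs.length

-- the price list of the first n secrets
def pvPrices (s : Int) (n : Nat) : List Int :=
  match n with
  | 0 => []
  | n + 1 => PySem.Int.mod s 10 :: pvPrices (pvNextSecret s) n

theorem pvGP_short (xs : List Int) (h : xs.length ≤ 4) : pvGP xs = [] :=
  match xs, h with
  | [], _ => by simp [pvGP]
  | [_], _ => by simp [pvGP]
  | [_, _], _ => by simp [pvGP]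
  | [_, _, _], _ => by simp [pvGP]
  | [_, _, _, _], _ => by simp [pvGP]

-- A-side: the zip-of-shifted-streams form equals pvGP of the price list
theorem pvA_eq_gp (xs : List Int) :
    (pvZip5 xs (xs.drop 1) (xs.drop 2) (xs.drop 3) (xs.drop 4)).map pvWindowEntry
      = pvGP (xs.map (fun s => PySem.Int.mod s 10)) := by
  induction xs with
  | nil => simp [pvZip5, pvGP]
  | cons a t ih =>
    rcases t with _ | ⟨b, t⟩
    · simp [pvZip5, pvGP]
    rcases t with _ | ⟨c, t⟩
    · simp [pvZip5, pvGP]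
    rcases t with _ | ⟨d, t⟩
    · simp [pvZip5, pvGP]
    rcases t with _ | ⟨e, t⟩
    · simp [pvZip5, pvGP]
    simp only [List.drop_succ_cons, List.drop_zero, pvZip5, List.map_cons] at ih ⊢
    rw [pvGP]
    refine congrArg₂ List.cons ?_ ih
    simp [pvWindowEntry, PySem.List.pyGet?, PySem.List.pyIdx?]

-- B-side invariant
theorem pvNextB_eq : pvNextSecretB = pvNextSecret := rfl

theorem pvB_inv (n : Nat) : ∀ (s : Int) (win : List Int), win.length ≤ 5 →
    pvAltLoop n s win = pvGP (win.drop (win.length - 4) ++ pvPrices s n) := by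
  induction n with
  | zero =>
    intro s win h
    simp only [pvAltLoop, pvPrices, List.append_nil]
    exact (pvGP_short _ (by simp; omega)).symm
  | succ n ih =>
    intro s win h
    rcases win with _ | ⟨a, win⟩
    · simp [pvAltLoop, pvPrices, pvNextB_eq]
      exact ih _ _ (by simp)
    rcases win with _ | ⟨b, win⟩
    · simp [pvAltLoop, pvPrices, pvNextB_eq]
      exact ih _ _ (by simp)
    rcases win with _ | ⟨c, win⟩
    · simp [pvAltLoop, pvPrices, pvNextB_eq]
      exact ih _ _ (by simp)
    rcases win with _ | ⟨d, win⟩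
    · simp [pvAltLoop, pvPrices, pvNextB_eq]
      exact ih _ _ (by simp)
    rcases win with _ | ⟨e, win⟩
    · simp [pvAltLoop, pvPrices, pvNextB_eq, pvGP]
      exact ih _ _ (by simp)
    rcases win with _ | ⟨f, win⟩
    · simp [pvAltLoop, pvPrices, pvNextB_eq, pvGP]
      exact ih _ _ (by simp)
    · simp at h; omega

theorem pvPrices_eq (s : Int) (n : Nat) :
    pvPrices s n = (pvYieldSecrets s n).map (fun t => PySem.Int.mod t 10) := by
  induction n generalizing s with
  | zero => rfl
  | succ n ih => simp [pvPrices, pvYieldSecrets, ih]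

-- ===== VERDICT (by name: the statement is the Claim_ definition above) =====
theorem yield_patterns_and_prices_py_spec : Claim_equal_yield_patterns_and_prices_py := by
  intro i n _
  show _ = _
  rw [yield_patterns_and_prices_py, yield_patterns_and_prices_py_alt,
      pvA_eq_gp, pvB_inv _ _ _ (by simp), ← pvPrices_eq]
  rfl
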